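-- pv_equiv track=rewrite | github.com/Rai220/anima | epoch_2/generation_5/prose_xray.py | find_close_repeats
-- ===== SOURCE A (Python) =====
-- def find_close_repeats(tokens, window=30):
--     """Найти слова, повторяющиеся в пределах window слов."""
--     repeats = []
--     positions = {}
--     for i, (word, _) in enumerate(tokens):
--         if len(word) < 4:
--             continue
--         if word in positions and i - positions[word] <= window:
--             repeats.append((word, positions[word], i))
--         positions[word] = i
--     return repeats
-- ===== SOURCE B (Python) =====
-- def find_close_repeats(tokens, window=30):
--     """Найти слова, повторяющиеся в пределах window слов."""
--     words = [w for (w, _) in tokens]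
--     repeats = []
--     for i, word in enumerate(words):
--         if len(word) < 4:
--             continue
--         j = i - 1
--         while j >= 0:
--             if words[j] == word:
--                 if i - j <= window:
--                     repeats.append((word, j, i))
--                 break
--             j -= 1
--     return repeats
-- ===== Notes on version B (the rewrite author's own statement) =====
-- stated objective: alternative
-- what changed: Replaces A's running last-position dictionary with a direct backward scan: for each long word B searches the preceding tokens for its most recent earlier occurrence, so no positions dict is maintained.
import Mathlib
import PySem

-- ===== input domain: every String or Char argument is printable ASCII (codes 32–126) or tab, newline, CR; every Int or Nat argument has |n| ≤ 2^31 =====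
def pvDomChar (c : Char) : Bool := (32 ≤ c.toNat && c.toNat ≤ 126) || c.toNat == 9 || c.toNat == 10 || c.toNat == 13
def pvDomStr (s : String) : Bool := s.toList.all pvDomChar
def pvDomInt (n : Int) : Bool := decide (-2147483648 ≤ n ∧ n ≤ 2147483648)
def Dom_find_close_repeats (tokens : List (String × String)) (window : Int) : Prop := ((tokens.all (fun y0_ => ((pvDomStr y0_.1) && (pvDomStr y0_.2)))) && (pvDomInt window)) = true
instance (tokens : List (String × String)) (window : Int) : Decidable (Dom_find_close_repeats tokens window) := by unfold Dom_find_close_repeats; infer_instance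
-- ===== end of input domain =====

-- B replaces A's running last-position dictionary by a direct backward scan over the
-- already-seen words (alternative decomposition; no speed claim).

-- ===== PORT A =====
def find_close_repeats (tokens : List (String × String)) (window : Int) : List (String × Int × Int) :=
  ((PySem.List.enumerate tokens 0).foldl
    (fun (st : List (String × Int × Int) × PySem.Dict String Int) p =>
      let i := p.1
      let word := p.2.1
      if PySem.Str.len word < 4 then st
      else
        let reps :=
          match st.2.get? word with
          | some prev => if i - prev ≤ window then st.1 ++ [(word, prev, i)] else st.1
          | none => st.1
        (reps, st.2.insert word i))
    ([], PySem.Dict.empty)).1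

-- ===== PORT B =====
-- B's inner 'while j >= 0' loop scanning words[j], j = i-1, i-2, …: ported as a walk down
-- the reversed seen prefix, carrying the current index j.
def pvBackFind (seenRev : List String) (word : String) (j : Int) : Option Int :=
  match seenRev with
  | [] => none
  | w :: rest => if w == word then some j else pvBackFind rest word (j - 1)

-- B's outer loop over the word list; seenRev is the already-scanned prefix, reversed.
def pvAltLoop (window : Int) (seenRev : List String) (i : Int) : List String → List (String × Int × Int)
  | [] => []
  | word :: rest =>
      let here :=
        if PySem.Str.len word < 4 then []
        else
          match pvBackFind seenRev word (i - 1) with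
          | some j => if i - j ≤ window then [(word, j, i)] else []
          | none => []
      here ++ pvAltLoop window (word :: seenRev) (i + 1) rest

def find_close_repeats_alt (tokens : List (String × String)) (window : Int) : List (String × Int × Int) :=
  pvAltLoop window [] 0 (tokens.map (·.1))

-- ===== PRECONDITION & SPEC =====
def Spec_find_close_repeats (tokens : List (String × String)) (window : Int) (out : List (String × Int × Int)) : Prop := out = find_close_repeats_alt tokens window
instance (tokens : List (String × String)) (window : Int) (out : List (String × Int × Int)) : Decidable (Spec_find_close_repeats tokens window out) := by unfold Spec_find_close_repeats; infer_instance

-- ===== CLAIM (what is proved, stated in full; the proofs are below) =====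
def Claim_equal_find_close_repeats : Prop := ∀ (tokens : List (String × String)) (window : Int), Dom_find_close_repeats tokens window → Spec_find_close_repeats tokens window (find_close_repeats tokens window)

-- ===== LEMMAS AND PROOFS =====

-- A's loop, written as structural recursion over the word list (proof-side restatement).
def pvAGo (window : Int) (pos : PySem.Dict String Int) (i : Int) : List String → List (String × Int × Int)
  | [] => []
  | word :: rest =>
      if PySem.Str.len word < 4 then pvAGo window pos (i + 1) rest
      else
        let here :=
          match pos.get? word with
          | some prev => if i - prev ≤ window then [(word, prev, i)] else []
          | none => []
        here ++ pvAGo window (pos.insert word i) (i + 1) rest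

theorem pvA_foldl_eq (window : Int) (ts : List (String × String)) :
    ∀ (i : Int) (acc : List (String × Int × Int)) (pos : PySem.Dict String Int),
    ((PySem.List.enumerate ts i).foldl
      (fun (st : List (String × Int × Int) × PySem.Dict String Int) p =>
        let i := p.1
        let word := p.2.1
        if PySem.Str.len word < 4 then st
        else
          let reps :=
            match st.2.get? word with
            | some prev => if i - prev ≤ window then st.1 ++ [(word, prev, i)] else st.1
            | none => st.1
          (reps, st.2.insert word i))
      (acc, pos)).1 = acc ++ pvAGo window pos i (ts.map (·.1)) := by
  induction ts with
  | nil => intro i acc pos; simp [PySem.List.enumerate_nil, pvAGo]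
  | cons t rest ih =>
    intro i acc pos
    obtain ⟨word, tag⟩ := t
    rw [PySem.List.enumerate_cons, List.foldl_cons]
    by_cases h : PySem.Str.len word < 4
    · simp only [h, List.map_cons, pvAGo, if_pos]
      exact ih (i + 1) acc pos
    · simp only [List.map_cons, pvAGo, if_neg h]
      cases hg : pos.get? word with
      | none => simpa [h, hg] using ih (i + 1) acc (pos.insert word i)
      | some prev =>
        by_cases hw : i - prev ≤ window
        · simpa [h, hg, hw] using ih (i + 1) (acc ++ [(word, prev, i)]) (pos.insert word i)
        · simpa [h, hg, hw] using ih (i + 1) acc (pos.insert word i)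

theorem pvAGo_eq_altLoop (window : Int) (ws : List String) :
    ∀ (i : Int) (pos : PySem.Dict String Int) (seenRev : List String),
    (∀ w : String, ¬ PySem.Str.len w < 4 → pos.get? w = pvBackFind seenRev w (i - 1)) →
    pvAGo window pos i ws = pvAltLoop window seenRev i ws := by
  induction ws with
  | nil => intro i pos seenRev _; simp [pvAGo, pvAltLoop]
  | cons word rest ih =>
    intro i pos seenRev hinv
    by_cases h : PySem.Str.len word < 4
    · simp only [pvAGo, pvAltLoop, if_pos h, List.nil_append]
      apply ih
      intro w hw
      have hne : word ≠ w := by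
        intro he; subst he; exact hw h
      simp only [pvBackFind, beq_iff_eq, if_neg hne]
      have := hinv w hw
      simpa using this
    · simp only [pvAGo, pvAltLoop, if_neg h]
      rw [hinv word h]
      congr 1
      apply ih
      intro w hw
      rw [PySem.Dict.get?_insert]
      simp only [pvBackFind, beq_iff_eq]
      by_cases he : w = word
      · subst he; simp
      · have : ¬ (word = w) := fun hx => he hx.symm
        rw [if_neg he, if_neg this, hinv w hw]
        simp

-- ===== VERDICT (by name: the statement is the Claim_ definition above) =====
theorem find_close_repeats_spec : Claim_equal_find_close_repeats := by
  intro tokens window _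
  unfold Spec_find_close_repeats find_close_repeats find_close_repeats_alt
  rw [pvA_foldl_eq window tokens 0 [] PySem.Dict.empty, List.nil_append]
  exact pvAGo_eq_altLoop window (tokens.map (·.1)) 0 PySem.Dict.empty []
    (fun w _ => by simp [PySem.Dict.get?_empty, pvBackFind])
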